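-- pv_equiv track=rewrite | github.com/SuneraEs/SUNERA-Assistant- | utils/common.py | pick_lang
-- ===== SOURCE A (Python) =====
-- def pick_lang(lang_code: str) -> str:
--     if not lang_code:
--         return "ru"
--     code = lang_code.lower()
--     for k in ["ru","en","es","pl","de","uk"]:
--         if code.startswith(k):
--             return k
--     return "ru"
-- ===== SOURCE B (Python) =====
-- _TRIE = {
--     "r": {"u": "ru"},
--     "e": {"n": "en", "s": "es"},
--     "p": {"l": "pl"},
--     "d": {"e": "de"},
--     "u": {"k": "uk"},
-- }
--
-- def pick_lang(lang_code: str) -> str: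
--     # Walk a character trie: match the lowercased code character by character;
--     # a string leaf is the answer, falling off the trie (or running out of
--     # characters) yields the default "ru".
--     node = _TRIE
--     for ch in lang_code.lower():
--         node = node.get(ch)
--         if node is None:
--             return "ru"
--         if isinstance(node, str):
--             return node
--     return "ru"
-- ===== Notes on version B (the rewrite author's own statement) =====
-- stated objective: alternative
-- what changed: Replaces the startswith scan over the list of supported codes by a character-by-character walk of a two-level character trie with string leaves: matching is per character through nested dicts instead of whole-key prefix tests.
import Mathlib
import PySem

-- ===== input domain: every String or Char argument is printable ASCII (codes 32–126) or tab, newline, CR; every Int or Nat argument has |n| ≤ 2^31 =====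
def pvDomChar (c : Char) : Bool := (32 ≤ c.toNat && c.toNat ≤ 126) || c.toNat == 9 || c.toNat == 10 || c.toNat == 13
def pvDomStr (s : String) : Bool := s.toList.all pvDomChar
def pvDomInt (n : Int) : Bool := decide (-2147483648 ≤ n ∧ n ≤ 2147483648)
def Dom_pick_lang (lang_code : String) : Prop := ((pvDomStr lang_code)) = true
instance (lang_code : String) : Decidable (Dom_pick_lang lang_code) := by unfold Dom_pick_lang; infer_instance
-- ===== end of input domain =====

-- B replaces A's startswith scan over the whole key list by a character-by-character walk of a
-- two-level character trie with string leaves (alternative decomposition; same results).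
-- ===== PORT A =====
-- Port of A: early return on empty, then scan the key list with startswith (find? = first matching key).
def pick_lang (lang_code : String) : String :=
  if lang_code = "" then "ru"
  else
    let code := PySem.Str.lower lang_code
    match (["ru", "en", "es", "pl", "de", "uk"] : List String).find?
        (fun k => PySem.Str.startswith code k) with
    | some k => k
    | none => "ru"

-- ===== PORT B =====
-- _TRIE: char → (char → code string); Python's dict-of-dicts literal as nested Dict literals.
def pvTrie : PySem.Dict Char (PySem.Dict Char String) :=
  PySem.Dict.mk
    [('r', PySem.Dict.mk [('u', "ru")]),
     ('e', PySem.Dict.mk [('n', "en"), ('s', "es")]),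
     ('p', PySem.Dict.mk [('l', "pl")]),
     ('d', PySem.Dict.mk [('e', "de")]),
     ('u', PySem.Dict.mk [('k', "uk")])]

-- the `for ch in …` loop after the first character consumed the root: node is an inner dict;
-- a successful lookup yields a string, so `isinstance(node, str)` fires in that same iteration.
def pvWalk : List Char → PySem.Dict Char String → String
  | [], _ => "ru"                       -- loop exhausted → final return "ru"
  | ch :: _, d =>
      match d.get? ch with
      | none => "ru"                    -- node is None → return "ru"
      | some s => s                     -- isinstance(node, str) → return node

-- first iteration: node starts as the root dict (lookup fails → "ru", else continue on the subdict)
def pvWalkRoot : List Char → String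
  | [] => "ru"
  | ch :: rest =>
      match pvTrie.get? ch with
      | none => "ru"
      | some d => pvWalk rest d

def pick_lang_alt (lang_code : String) : String :=
  pvWalkRoot (PySem.Str.lower lang_code).toList

-- ===== PRECONDITION & SPEC =====
def Spec_pick_lang (lang_code : String) (out : String) : Prop := out = pick_lang_alt lang_code
instance (lang_code : String) (out : String) : Decidable (Spec_pick_lang lang_code out) := by unfold Spec_pick_lang; infer_instance

-- ===== CLAIM (what is proved, stated in full; the proofs are below) =====
def Claim_equal_pick_lang : Prop := ∀ (lang_code : String), Dom_pick_lang lang_code → Spec_pick_lang lang_code (pick_lang lang_code)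

-- ===== LEMMAS AND PROOFS =====

-- startswith by a 2-char key k = (first two chars of code equal k's chars)
theorem pv_sw2 (code : String) (k : String) (a b : Char) (hk : k.toList = [a, b]) :
    PySem.Str.startswith code k = decide (code.toList.take 2 = [a, b]) := by
  have h : PySem.Str.startswith code k = true ↔ code.toList.take 2 = [a, b] := by
    rw [PySem.Str.startswith_eq, PySem.Chars.startswith_iff, List.prefix_iff_eq_take, hk]
    constructor
    · intro h; exact h.symm
    · intro h; exact h.symm
  cases hb : PySem.Str.startswith code k
  · have : ¬ (code.toList.take 2 = [a, b]) := fun hc => by rw [h.mpr hc] at hb; simp at hb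
    simp [this]
  · simp [h.mp hb]

-- lang_code ≠ "" → the lowered char list is nonempty
theorem pv_lower_ne_nil (s : String) (hs : s ≠ "") : (PySem.Str.lower s).toList ≠ [] := by
  rw [PySem.Str.toList_lower]
  intro h
  exact hs (String.toList_inj.mp (by simpa using (List.map_eq_nil_iff).mp h))

-- ===== VERDICT (by name: the statement is the Claim_ definition above) =====
theorem pick_lang_spec : Claim_equal_pick_lang := by
  intro s _
  unfold Spec_pick_lang pick_lang pick_lang_alt
  by_cases he : s = ""
  · subst he; decide
  · simp only [if_neg he]
    rw [List.find?, List.find?, List.find?, List.find?, List.find?, List.find?,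
      pv_sw2 _ "ru" 'r' 'u' (by decide), pv_sw2 _ "en" 'e' 'n' (by decide),
      pv_sw2 _ "es" 'e' 's' (by decide), pv_sw2 _ "pl" 'p' 'l' (by decide),
      pv_sw2 _ "de" 'd' 'e' (by decide), pv_sw2 _ "uk" 'u' 'k' (by decide)]
    have hne := pv_lower_ne_nil s he
    generalize (PySem.Str.lower s).toList = cs at hne ⊢
    match cs with
    | [] => exact absurd rfl hne
    | [c] =>
      simp only [List.take]
      norm_num
      cases h : pvTrie.get? c <;> simp [pvWalkRoot, h, pvWalk]
    | c :: d :: rest =>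
      simp only [List.take]
      by_cases h1 : c = 'r' ∧ d = 'u'
      · obtain ⟨rfl, rfl⟩ := h1; simp [pvWalkRoot, pvTrie, PySem.Dict.get?, pvWalk]
      by_cases h2 : c = 'e' ∧ d = 'n'
      · obtain ⟨rfl, rfl⟩ := h2; simp_all [pvWalkRoot, pvTrie, PySem.Dict.get?, pvWalk]
      by_cases h3 : c = 'e' ∧ d = 's'
      · obtain ⟨rfl, rfl⟩ := h3; simp_all [pvWalkRoot, pvTrie, PySem.Dict.get?, pvWalk]
      by_cases h4 : c = 'p' ∧ d = 'l'
      · obtain ⟨rfl, rfl⟩ := h4; simp_all [pvWalkRoot, pvTrie, PySem.Dict.get?, pvWalk]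
      by_cases h5 : c = 'd' ∧ d = 'e'
      · obtain ⟨rfl, rfl⟩ := h5; simp_all [pvWalkRoot, pvTrie, PySem.Dict.get?, pvWalk]
      by_cases h6 : c = 'u' ∧ d = 'k'
      · obtain ⟨rfl, rfl⟩ := h6; simp_all [pvWalkRoot, pvTrie, PySem.Dict.get?, pvWalk]
      · have hA : ∀ (a b : Char), ¬ (c = a ∧ d = b) → ([c, d] = [a, b]) = False := by
          intro a b h; simp only [List.cons.injEq, and_true, eq_iff_iff, iff_false]; tauto
        simp only [hA 'r' 'u' h1, hA 'e' 'n' h2, hA 'e' 's' h3, hA 'p' 'l' h4,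
          hA 'd' 'e' h5, hA 'u' 'k' h6, decide_false]
        -- B falls off the trie: case on the first character, then the mismatching second lookup
        by_cases hc1 : c = 'r'
        · subst hc1
          have hd : d ≠ 'u' := fun h => h1 ⟨rfl, h⟩
          simp [pvWalkRoot, pvTrie, PySem.Dict.get?, pvWalk, Ne.symm hd]
        by_cases hc2 : c = 'e'
        · subst hc2
          have hdn : d ≠ 'n' := fun h => h2 ⟨rfl, h⟩
          have hds : d ≠ 's' := fun h => h3 ⟨rfl, h⟩
          simp [pvWalkRoot, pvTrie, PySem.Dict.get?, pvWalk, Ne.symm hdn, Ne.symm hds]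
        by_cases hc3 : c = 'p'
        · subst hc3
          have hd : d ≠ 'l' := fun h => h4 ⟨rfl, h⟩
          simp [pvWalkRoot, pvTrie, PySem.Dict.get?, pvWalk, Ne.symm hd]
        by_cases hc4 : c = 'd'
        · subst hc4
          have hd : d ≠ 'e' := fun h => h5 ⟨rfl, h⟩
          simp [pvWalkRoot, pvTrie, PySem.Dict.get?, pvWalk, Ne.symm hd]
        by_cases hc5 : c = 'u'
        · subst hc5
          have hd : d ≠ 'k' := fun h => h6 ⟨rfl, h⟩
          simp [pvWalkRoot, pvTrie, PySem.Dict.get?, pvWalk, Ne.symm hd]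
        · simp [pvWalkRoot, pvTrie, PySem.Dict.get?, 
            Ne.symm hc1, Ne.symm hc2, Ne.symm hc3, Ne.symm hc4, Ne.symm hc5]
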